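-- pv_equiv track=rewrite | github.com/sarishtshreshth0/plag_extract | Project_CodeNet_Python800/p02850/s839714663.py | color_available
-- ===== SOURCE A (Python) =====
-- def color_available(unavailable, K):
--     idx = 0
--     L = len(unavailable)
--     unavailable = sorted(unavailable)
--     for color in range(K):
--         if idx < L and color == unavailable[idx]:
--             idx += 1
--         else:
--             yield color
-- ===== SOURCE B (Python) =====
-- def color_available(unavailable, K):
--     seen = set(unavailable)
--     for color in range(K):
--         if color not in seen:
--             yield color
-- ===== Notes on version B (the rewrite author's own statement) =====
-- stated objective: idiomatic
-- what changed: Replaced the sort plus merge-pointer walk over the sorted list by a single set built once and a plain membership test per color, removing the sort and all cross-iteration pointer state.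
-- intended difference: When unavailable contains a negative element alongside an in-range one, or a duplicated in-range value with a larger in-range value after it, A's pointer gets stuck and A yields colors that are in unavailable (e.g. [1,1,2], K=4 -> [0,2,3]); B yields only colors not in the set ([0,3]), which is the intended behaviour. — e.g. on color_available([1, 1, 2], 4): A returns [0, 2, 3], B returns [0, 3]
import Mathlib
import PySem

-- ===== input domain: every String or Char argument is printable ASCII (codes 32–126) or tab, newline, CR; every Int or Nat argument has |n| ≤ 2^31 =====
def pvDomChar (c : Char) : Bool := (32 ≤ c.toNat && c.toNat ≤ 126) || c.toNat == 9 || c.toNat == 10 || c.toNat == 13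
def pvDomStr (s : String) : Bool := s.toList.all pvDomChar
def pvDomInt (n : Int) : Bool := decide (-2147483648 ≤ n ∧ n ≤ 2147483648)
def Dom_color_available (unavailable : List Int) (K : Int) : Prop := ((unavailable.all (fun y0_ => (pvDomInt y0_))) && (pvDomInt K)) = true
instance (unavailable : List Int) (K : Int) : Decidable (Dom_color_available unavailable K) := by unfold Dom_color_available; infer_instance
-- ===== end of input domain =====

-- B replaces A's sort + merge-pointer walk by one set built once and a membership test
-- per color (idiomatic); on the D_ inputs below A's stuck pointer yields unavailable
-- colors and B returns the intended ones.

-- ===== PORT A =====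
-- generator collected into the list of yielded values; loop state = (idx, yielded so far)
def color_available (unavailable : List Int) (K : Int) : List Int :=
  let L := unavailable.length
  let s := PySem.List.sorted unavailable (fun x => x) false
  ((PySem.List.pyRange 0 K 1).foldl
    (fun (st : Nat × List Int) color =>
      if st.1 < L ∧ s.getD st.1 0 = color then (st.1 + 1, st.2)
      else (st.1, st.2 ++ [color]))
    (0, [])).2

-- ===== PORT B =====
def color_available_alt (unavailable : List Int) (K : Int) : List Int :=
  let seen := PySem.Set.ofList unavailable
  (PySem.List.pyRange 0 K 1).filter (fun color => !(PySem.Set.contains seen color))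

-- ===== PRECONDITION & SPEC =====
-- On inputs with a negative element next to an in-range one, or a duplicated in-range
-- value followed by a larger in-range value, A's sorted-pointer gets stuck and A yields
-- colors that are in unavailable; B yields exactly the colors not in the set, which is
-- the intended behaviour.
def D_color_available (unavailable : List Int) (K : Int) : Prop :=
  (∃ v ∈ unavailable, ∃ w ∈ unavailable, v < 0 ∧ 0 ≤ w ∧ w < K) ∨
  (∃ d ∈ unavailable, ∃ w ∈ unavailable, 0 ≤ d ∧ d < w ∧ w < K ∧ 2 ≤ unavailable.count d)
instance (unavailable : List Int) (K : Int) : Decidable (D_color_available unavailable K) := by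
  unfold D_color_available; infer_instance

def Spec_color_available (unavailable : List Int) (K : Int) (out : List Int) : Prop :=
  ¬ D_color_available unavailable K → out = color_available_alt unavailable K
instance (unavailable : List Int) (K : Int) (out : List Int) : Decidable (Spec_color_available unavailable K out) := by
  unfold Spec_color_available; infer_instance

def pvDiffWitness_color_available : List Int × Int := ([1, 1, 2], 4)
def pvDiffWitnessOut_color_available : (List Int) × (List Int) := ([0, 2, 3], [0, 3])

-- ===== CLAIM (what is proved, stated in full; the proofs are below) =====
def Claim_unchanged_color_available : Prop := ∀ (unavailable : List Int) (K : Int), Dom_color_available unavailable K → Spec_color_available unavailable K (color_available unavailable K)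
def Claim_changed_color_available : Prop := Dom_color_available (pvDiffWitness_color_available.1) (pvDiffWitness_color_available.2) ∧ D_color_available (pvDiffWitness_color_available.1) (pvDiffWitness_color_available.2) ∧ color_available (pvDiffWitness_color_available.1) (pvDiffWitness_color_available.2) = pvDiffWitnessOut_color_available.1 ∧ color_available_alt (pvDiffWitness_color_available.1) (pvDiffWitness_color_available.2) = pvDiffWitnessOut_color_available.2 ∧ pvDiffWitnessOut_color_available.1 ≠ pvDiffWitnessOut_color_available.2

-- ===== LEMMAS AND PROOFS =====

-- loop invariant for A's pointer walk at the moment color a is about to be processed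
def pvInv (s : List Int) (K a : Int) (idx : Nat) : Prop :=
  idx ≤ s.length ∧
  (∀ j, j < idx → s.getD j 0 < a) ∧
  (∀ v ∈ s, 0 ≤ v → v < a → v ∈ s.take idx) ∧
  (idx < s.length → s.getD idx 0 < a → ∀ v ∈ s, 0 ≤ v → v < K → v < a)

theorem pv_take_mono (l : List Int) (m n : Nat) (h : m ≤ n) : l.take m ⊆ l.take n :=
  List.take_subset_take_left l h

theorem pv_getElem_mem_take (l : List Int) (i n : Nat) (hi : i < n) (h : i < l.length) :
    l[i] ∈ l.take n := by
  have h2 : i < (l.take n).length := by simp [List.length_take]; omega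
  have h3 : (l.take n)[i] = l[i] := List.getElem_take
  exact h3 ▸ List.getElem_mem h2

theorem pv_loop (s : List Int) (K : Int)
    (hpair : s.Pairwise (· ≤ ·))
    (Hc : ∀ d ∈ s, 0 ≤ d → ∀ w ∈ s, d < w → w < K → 2 ≤ s.count d → False) :
    ∀ (n : Nat) (a : Int) (idx : Nat) (acc : List Int), (K - a).toNat ≤ n → 0 ≤ a → pvInv s K a idx →
      ((PySem.List.pyRange a K 1).foldl
        (fun (st : Nat × List Int) color =>
          if st.1 < s.length ∧ s.getD st.1 0 = color then (st.1 + 1, st.2)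
          else (st.1, st.2 ++ [color]))
        (idx, acc)).2
      = acc ++ (PySem.List.pyRange a K 1).filter (fun c => !(s.contains c)) := by
  intro n
  induction n with
  | zero =>
    intro a idx acc hn ha _
    rw [PySem.List.pyRange_one_eq_nil (by omega)]
    simp
  | succ n ih =>
    intro a idx acc hn ha hinv
    by_cases hK : a < K
    · rw [PySem.List.pyRange_one_cons hK]
      simp only [List.foldl_cons, List.filter_cons]
      by_cases hc : idx < s.length ∧ s.getD idx 0 = a
      · -- pointer consumes a
        obtain ⟨hlen, heq⟩ := hc
        have hga : s.getD idx 0 = s[idx] := List.getD_eq_getElem s 0 hlen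
        have hmem : a ∈ s := by rw [← heq, hga]; exact List.getElem_mem hlen
        have hcont : s.contains a = true := by simpa using hmem
        rw [if_pos ⟨hlen, heq⟩]
        have hinv' : pvInv s K (a + 1) (idx + 1) := by
          obtain ⟨h1, h2, h3, h4⟩ := hinv
          refine ⟨by omega, ?_, ?_, ?_⟩
          · intro j hj
            rcases Nat.lt_or_ge j idx with hj' | hj'
            · have := h2 j hj'; omega
            · have : j = idx := by omega
              subst this; omega
          · intro v hv h0 hlt
            rcases lt_or_eq_of_le (by omega : v ≤ a) with hva | hva
            · exact pv_take_mono s idx (idx + 1) (by omega) (h3 v hv h0 hva)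
            · subst hva
              have := pv_getElem_mem_take s idx (idx + 1) (by omega) hlen
              rw [hga] at heq; rw [heq] at this; exact this
          · intro hlen' hlt' v hv h0 hK'
            have hga' : s.getD (idx + 1) 0 = s[idx + 1] := List.getD_eq_getElem s 0 hlen'
            have hmono : s[idx] ≤ s[idx + 1] :=
              List.pairwise_iff_getElem.mp hpair idx (idx + 1) (by omega) hlen' (by omega)
            have heq' : s[idx + 1] = a := by rw [hga'] at hlt'; rw [hga] at heq; omega
            have hdrop : s.drop idx = a :: a :: s.drop (idx + 2) := by
              rw [List.drop_eq_getElem_cons hlen, List.drop_eq_getElem_cons hlen']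
              rw [hga] at heq; rw [heq, heq']
            have hsub : List.Sublist [a, a] s := by
              have h5 : List.Sublist [a, a] (s.drop idx) := by rw [hdrop]; simp
              exact h5.trans (List.drop_sublist idx s)
            have hcnt : 2 ≤ s.count a := by
              have := hsub.count_le a
              simpa using this
            by_contra hcon
            push Not at hcon
            exact Hc a hmem ha v hv (by omega) hK' hcnt
        have := ih (a + 1) (idx + 1) acc (by omega) (by omega) hinv'
        rw [this, hcont]
        simp
      · -- pointer does not match: a is yielded
        have hna : a ∉ s := by
          intro hmem
          obtain ⟨pos, hpos, hval⟩ := List.getElem_of_mem hmem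
          have hposge : idx ≤ pos := by
            by_contra h
            push Not at h
            have h2 := hinv.2.1 pos h
            rw [List.getD_eq_getElem s 0 hpos, hval] at h2
            omega
          have hlen : idx < s.length := lt_of_le_of_lt hposge hpos
          have hga : s.getD idx 0 = s[idx] := List.getD_eq_getElem s 0 hlen
          have hle : s[idx] ≤ s[pos] := by
            rcases Nat.lt_or_ge idx pos with h | h
            · exact List.pairwise_iff_getElem.mp hpair idx pos hlen hpos h
            · have : idx = pos := by omega
              subst this; exact le_refl _
          have hne : s.getD idx 0 ≠ a := fun h => hc ⟨hlen, h⟩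
          have hlt : s.getD idx 0 < a := by rw [hga]; rw [hga] at hne; omega
          exact absurd (hinv.2.2.2 hlen hlt a hmem ha hK) (lt_irrefl a)
        have hcont : s.contains a = false := by simpa using hna
        rw [if_neg hc]
        have hinv' : pvInv s K (a + 1) idx := by
          obtain ⟨h1, h2, h3, h4⟩ := hinv
          refine ⟨h1, ?_, ?_, ?_⟩
          · intro j hj; have := h2 j hj; omega
          · intro v hv h0 hlt
            rcases lt_or_eq_of_le (by omega : v ≤ a) with hva | hva
            · exact h3 v hv h0 hva
            · exact absurd (hva ▸ hv) hna
          · intro hlen' hlt' v hv h0 hK'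
            have hga' : s.getD idx 0 = s[idx] := List.getD_eq_getElem s 0 hlen'
            have hne : s.getD idx 0 ≠ a := fun h => hc ⟨hlen', h⟩
            have hlt2 : s.getD idx 0 < a := by omega
            have := h4 hlen' hlt2 v hv h0 hK'
            omega
        have := ih (a + 1) idx (acc ++ [a]) (by omega) (by omega) hinv'
        rw [this, hcont]
        simp
    · rw [PySem.List.pyRange_one_eq_nil (by omega)]
      simp

theorem color_available_spec : Claim_unchanged_color_available := by
  intro u K _ hnD
  show color_available u K = color_available_alt u K
  simp only [color_available, color_available_alt]
  have hperm : (PySem.List.sorted u (fun x => x) false).Perm u := PySem.List.sorted_perm u (fun x => x) false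
  set s := PySem.List.sorted u (fun x => x) false with hs
  have hlenu : u.length = s.length := (hperm.length_eq).symm
  have hmemiff : ∀ x : Int, x ∈ s ↔ x ∈ u := fun x => hperm.mem_iff
  have hcount : ∀ x : Int, s.count x = u.count x := fun x => hperm.count_eq x
  have hpair : s.Pairwise (· ≤ ·) := PySem.List.sorted_pairwise u (fun x => x)
  unfold D_color_available at hnD
  push Not at hnD
  have Hn : ∀ v ∈ s, v < 0 → ∀ w ∈ s, 0 ≤ w → w < K → False := by
    intro v hv hv0 w hw hw0 hwK
    have := hnD.1 v ((hmemiff v).mp hv) w ((hmemiff w).mp hw)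
    omega
  have Hc : ∀ d ∈ s, 0 ≤ d → ∀ w ∈ s, d < w → w < K → 2 ≤ s.count d → False := by
    intro d hd hd0 w hw hdw hwK hcnt
    have := hnD.2 d ((hmemiff d).mp hd) w ((hmemiff w).mp hw)
    rw [hcount d] at hcnt
    omega
  have inv0 : pvInv s K 0 0 := by
    refine ⟨Nat.zero_le _, ?_, ?_, ?_⟩
    · intro j hj; omega
    · intro v _ h0 hlt; omega
    · intro hlen hlt v hv h0 hK'
      have hmem0 : s.getD 0 0 ∈ s := by
        rw [List.getD_eq_getElem s 0 hlen]; exact List.getElem_mem hlen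
      exact (Hn _ hmem0 hlt v hv h0 hK').elim
  rw [hlenu]
  rw [pv_loop s K hpair Hc (K - 0).toNat 0 0 [] (le_refl _) (le_refl 0) inv0]
  rw [List.nil_append]
  apply List.filter_congr
  intro c _
  have : PySem.Set.contains (PySem.Set.ofList u) c = s.contains c := by
    have h1 : (PySem.Set.contains (PySem.Set.ofList u) c = true) ↔ (s.contains c = true) := by
      simp [PySem.Set.contains, PySem.Set.mem_ofList, hmemiff]
    rcases Bool.eq_false_or_eq_true (s.contains c) with h | h <;>
      rcases Bool.eq_false_or_eq_true (PySem.Set.contains (PySem.Set.ofList u) c) with h2 | h2 <;>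
      simp_all
  rw [this]

theorem color_available_changed : Claim_changed_color_available := by
  unfold Claim_changed_color_available; decide
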